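-- pv_equiv track=rewrite | github.com/Association-INTech/TechTheTurf-HighLevel | Evans/Pami.py | trad
-- ===== SOURCE A (Python) =====
-- def trad(line, nb):
--     k = 0
--     j = 0
--     l = []
--     for i in range(nb - 1):
--         while line[j] != ' ':
--             j = j + 1
--         l.append(line[k:j])
--         k = j + 1
--         j = j + 1
--     l.append(line[j:])
--     return l
-- ===== SOURCE B (Python) =====
-- def trad(line, nb):
--     if nb <= 1:
--         return [line]
--     j = 0
--     while line[j] != ' ':
--         j = j + 1
--     return [line[:j]] + trad(line[j + 1:], nb - 1)
-- ===== Notes on version B (the rewrite author's own statement) =====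
-- stated objective: simpler
-- what changed: Replaces the index-bookkeeping loop (k, j, accumulator list) by a recursion that peels off the field before the first space and recurses on the remaining suffix with nb-1.
import Mathlib
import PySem

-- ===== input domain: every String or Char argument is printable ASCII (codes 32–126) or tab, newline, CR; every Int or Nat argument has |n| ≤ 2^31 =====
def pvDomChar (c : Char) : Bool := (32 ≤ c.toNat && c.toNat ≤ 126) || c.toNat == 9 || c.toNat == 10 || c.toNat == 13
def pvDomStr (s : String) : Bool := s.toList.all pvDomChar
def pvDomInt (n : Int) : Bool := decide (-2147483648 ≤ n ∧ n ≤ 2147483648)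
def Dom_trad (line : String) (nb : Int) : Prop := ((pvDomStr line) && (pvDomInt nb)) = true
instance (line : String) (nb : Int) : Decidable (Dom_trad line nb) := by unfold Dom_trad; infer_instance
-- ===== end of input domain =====

-- B replaces A's index-bookkeeping loop (k, j, accumulator) by a recursion peeling one field
-- per step; objective: simpler. Equivalence is proved on Pre_trad (exactly where A returns).

-- ===== PORT A =====
-- `while line[j] != ' ': j += 1`, scanning `rest = cs.drop j` with absolute offset j;
-- none = IndexError (the scan runs off the end).
def tradWhile (rest : List Char) (j : Nat) : Option Nat :=
  match rest with
  | [] => none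
  | c :: t => if c = ' ' then some j else tradWhile t (j + 1)

-- the `for i in range(nb-1)` loop; k and j are A's two indices (Python slices with
-- 0 ≤ k ≤ j ≤ len are exactly drop/take here, since all indices stay in range).
def tradLoop (cs : List Char) (i k j : Nat) (l : List String) : List String :=
  match i with
  | 0 => l ++ [String.mk (cs.drop j)]
  | i + 1 =>
    match tradWhile (cs.drop j) j with
    | none => []  -- IndexError: excluded by Pre_trad
    | some j' => tradLoop cs i (j' + 1) (j' + 1) (l ++ [String.mk ((cs.drop k).take (j' - k))])

def trad (line : String) (nb : Int) : List String :=
  tradLoop line.toList (nb - 1).toNat 0 0 []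

-- ===== PORT B =====
-- `while line[j] != ' ': j += 1` of Source B, returning the index of the first space
def tradAltScan (cs : List Char) : Option Nat :=
  match cs with
  | [] => none
  | c :: t => if c = ' ' then some 0 else (tradAltScan t).map (· + 1)

-- Source B's recursion on (line, nb); fuel (nb-1).toNat realises the `nb <= 1` base case
def tradAltAux (cs : List Char) (n : Nat) : List (List Char) :=
  match n with
  | 0 => [cs]
  | n + 1 =>
    match tradAltScan cs with
    | none => []  -- IndexError: excluded by Pre_trad
    | some j => cs.take j :: tradAltAux (cs.drop (j + 1)) n

def trad_alt (line : String) (nb : Int) : List String :=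
  (tradAltAux line.toList (nb - 1).toNat).map String.mk

-- ===== PRECONDITION & SPEC =====
-- Pre_trad excludes exactly the inputs where A raises IndexError (fewer than nb-1 spaces).
def Pre_trad (line : String) (nb : Int) : Prop :=
  nb - 1 ≤ (line.toList.count ' ' : Int)
instance (line : String) (nb : Int) : Decidable (Pre_trad line nb) := by
  unfold Pre_trad; infer_instance

def pvWitness_trad : String × Int := ("ab cd e", 3)

def Spec_trad (line : String) (nb : Int) (out : List String) : Prop := out = trad_alt line nb
instance (line : String) (nb : Int) (out : List String) : Decidable (Spec_trad line nb out) := by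
  unfold Spec_trad; infer_instance

-- ===== CLAIM (what is proved, stated in full; the proofs are below) =====
def Claim_equal_trad : Prop :=
  ∀ (line : String) (nb : Int), Dom_trad line nb → Pre_trad line nb →
    Spec_trad line nb (trad line nb)

-- ===== LEMMAS AND PROOFS =====

lemma exists_space_split (rest : List Char) (h : 1 ≤ rest.count ' ') :
    ∃ a b, rest = a ++ ' ' :: b ∧ ' ' ∉ a := by
  induction rest with
  | nil => simp at h
  | cons c t ih =>
    by_cases hc : c = ' '
    · exact ⟨[], t, by simp [hc], by simp⟩
    · have h' : 1 ≤ t.count ' ' := by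
        simpa [List.count_cons, hc] using h
      obtain ⟨a, b, hab, hna⟩ := ih h'
      exact ⟨c :: a, b, by simp [hab], by simp [hna]; exact fun h => hc h.symm⟩

lemma count_space_split (a b : List Char) (hna : ' ' ∉ a) :
    (a ++ ' ' :: b).count ' ' = b.count ' ' + 1 := by
  simp [List.count_append, List.count_eq_zero_of_not_mem hna]

lemma tradWhile_split (a : List Char) (hna : ' ' ∉ a) :
    ∀ b j, tradWhile (a ++ ' ' :: b) j = some (j + a.length) := by
  induction a with
  | nil => intro b j; simp [tradWhile]
  | cons c t ih =>
    intro b j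
    have hc : c ≠ ' ' := fun h => hna (by simp [h])
    have hnt : ' ' ∉ t := fun h => hna (List.mem_cons_of_mem _ h)
    simp [tradWhile, hc, ih hnt b (j + 1)]
    omega

lemma tradAltScan_split (a : List Char) (hna : ' ' ∉ a) :
    ∀ b, tradAltScan (a ++ ' ' :: b) = some a.length := by
  induction a with
  | nil => intro b; simp [tradAltScan]
  | cons c t ih =>
    intro b
    have hc : c ≠ ' ' := fun h => hna (by simp [h])
    have hnt : ' ' ∉ t := fun h => hna (List.mem_cons_of_mem _ h)
    simp [tradAltScan, hc, ih hnt b]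

lemma drop_split (a b : List Char) :
    (a ++ ' ' :: b).drop (a.length + 1) = b := by
  have : a ++ ' ' :: b = (a ++ [' ']) ++ b := by simp
  rw [this]
  have hl : a.length + 1 = (a ++ [' ']).length := by simp
  rw [hl, List.drop_left]

lemma take_split (a b : List Char) :
    (a ++ ' ' :: b).take a.length = a := by
  simpa using List.take_left (l₁ := a) (l₂ := ' ' :: b)

lemma tradLoop_eq (i : Nat) :
    ∀ (cs : List Char) (j : Nat) (l : List String),
      i ≤ (cs.drop j).count ' ' →
      tradLoop cs i j j l = l ++ (tradAltAux (cs.drop j) i).map String.mk := by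
  induction i with
  | zero => intro cs j l _; simp [tradLoop, tradAltAux]
  | succ i ih =>
    intro cs j l h
    obtain ⟨a, b, hab, hna⟩ := exists_space_split (cs.drop j) (le_trans (by omega) h)
    have hw : tradWhile (cs.drop j) j = some (j + a.length) := by
      rw [hab]; exact tradWhile_split a hna b j
    have hdrop : cs.drop (j + a.length + 1) = b := by
      rw [show j + a.length + 1 = j + (a.length + 1) by omega, ← List.drop_drop, hab,
        drop_split]
    have hcount : i ≤ b.count ' ' := by
      have := count_space_split a b hna
      rw [hab, this] at h; omega
    have hfield : (cs.drop j).take (j + a.length - j) = a := by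
      rw [show j + a.length - j = a.length by omega, hab, take_split]
    have hscan : tradAltScan (cs.drop j) = some a.length := by
      rw [hab]; exact tradAltScan_split a hna b
    have htake : (cs.drop j).take a.length = a := by rw [hab, take_split]
    have hdrop2 : (cs.drop j).drop (a.length + 1) = b := by rw [hab, drop_split]
    calc tradLoop cs (i + 1) j j l
        = tradLoop cs i (j + a.length + 1) (j + a.length + 1)
            (l ++ [String.mk a]) := by
          simp only [tradLoop, hw, hfield]
      _ = (l ++ [String.mk a]) ++ (tradAltAux b i).map String.mk := by
          rw [← hdrop]; exact ih cs (j + a.length + 1) (l ++ [String.mk a])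
            (by rw [hdrop]; exact hcount)
      _ = l ++ (tradAltAux (cs.drop j) (i + 1)).map String.mk := by
          simp [tradAltAux, hscan, htake, hdrop2]

-- ===== VERDICT (by name: the statement is the Claim_ definition above) =====
theorem trad_spec : Claim_equal_trad := by
  intro line nb _ hpre
  unfold Spec_trad trad trad_alt
  have hc : (nb - 1).toNat ≤ (line.toList.drop 0).count ' ' := by
    unfold Pre_trad at hpre
    simp only [List.drop_zero]
    omega
  simpa using tradLoop_eq (nb - 1).toNat line.toList 0 [] hc
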